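-- pv_equiv track=rewrite | github.com/vivsh/djingles | djingles/jinja2/extensions.py | _format_whitespace
-- ===== SOURCE A (Python) =====
-- def _format_whitespace(block):
--     blocks = []
--     current = []
--     empty = 0
--     for ln in block.strip().splitlines():
--         ln = ln.strip()
--         if not ln:
--             empty += 1
--         else:
--             empty = 0
--         if not ln and current:
--             content = "<p>%s</p>" % ("<br>".join(current))
--             current = []
--             blocks.append(content)
--         elif ln:
--             current.append(ln)
--         elif empty <= 2:
--             blocks.append("<br>")
--     if current:
--         content = "<p>%s</p>" % ("<br>".join(current))
--         blocks.append(content)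
--     return "".join(blocks)
-- ===== SOURCE B (Python) =====
-- def _format_whitespace(block):
--     # Run-scanning rewrite: strip once, then scan maximal runs of non-blank
--     # (paragraph) / blank (gap) lines; a gap of >= 2 blank lines yields one "<br>".
--     lines = [ln.strip() for ln in block.strip().splitlines()]
--     out = []
--     i, n = 0, len(lines)
--     while i < n:
--         j = i
--         if lines[i]:
--             while j < n and lines[j]:
--                 j += 1
--             out.append("<p>%s</p>" % "<br>".join(lines[i:j]))
--         else:
--             while j < n and not lines[j]:
--                 j += 1
--             if j - i >= 2:
--                 out.append("<br>")
--         i = j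
--     return "".join(out)
-- ===== Notes on version B (the rewrite author's own statement) =====
-- stated objective: alternative
-- what changed: Replaces A's single stateful pass (pending-paragraph buffer plus consecutive-empty counter with four interacting branches) by a two-phase run scanner: strip all lines once, then scan maximal runs - a non-blank run becomes one <p>...</p>, a blank run of length >= 2 becomes one <br>.
import Mathlib
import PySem

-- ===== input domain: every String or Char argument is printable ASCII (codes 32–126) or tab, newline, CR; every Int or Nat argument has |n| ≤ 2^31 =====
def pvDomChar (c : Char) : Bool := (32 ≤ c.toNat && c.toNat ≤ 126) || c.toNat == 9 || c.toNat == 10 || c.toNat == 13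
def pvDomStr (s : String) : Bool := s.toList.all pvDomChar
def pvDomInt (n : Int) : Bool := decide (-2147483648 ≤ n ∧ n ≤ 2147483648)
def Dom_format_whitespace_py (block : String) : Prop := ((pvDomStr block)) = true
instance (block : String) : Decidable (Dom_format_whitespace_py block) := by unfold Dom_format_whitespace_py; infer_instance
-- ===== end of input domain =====

-- B replaces A's single stateful pass (pending-paragraph buffer + consecutive-empty
-- counter) by a two-phase run scanner over the stripped lines (objective: alternative).

def pvBr : List Char := ['<', 'b', 'r', '>']

def pvPara (cur : List (List Char)) : List Char :=
  ['<', 'p', '>'] ++ PySem.Chars.join ['<', 'b', 'r', '>'] cur ++ ['<', '/', 'p', '>']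

-- ===== PORT A =====
-- state = (blocks, current, empty); one fold step per line of block.strip().splitlines()
def pvAStep (st : List (List Char) × List (List Char) × Nat) (ln0 : List Char) :
    List (List Char) × List (List Char) × Nat :=
  let ln := PySem.Chars.strip ln0
  let empty := if ln.isEmpty then st.2.2 + 1 else 0
  if ln.isEmpty && !st.2.1.isEmpty then (st.1 ++ [pvPara st.2.1], [], empty)
  else if !ln.isEmpty then (st.1, st.2.1 ++ [ln], empty)
  else if empty ≤ 2 then (st.1 ++ [pvBr], st.2.1, empty)
  else (st.1, st.2.1, empty)

def format_whitespace_py (block : String) : String :=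
  let st := (PySem.Chars.splitlines (PySem.Chars.strip block.toList)).foldl pvAStep ([], [], 0)
  let blocks := if !st.2.1.isEmpty then st.1 ++ [pvPara st.2.1] else st.1
  String.ofList (PySem.Chars.join [] blocks)

-- ===== PORT B =====
-- run scanner: a maximal non-blank run becomes one paragraph piece, a maximal blank
-- run of length ≥ 2 becomes one "<br>" piece (Source B's index runs as takeWhile/dropWhile)
def pvAltGo : Nat → List (List Char) → List (List Char)
  | _, [] => []
  | 0, _ :: _ => []
  | fuel + 1, l :: rest =>
    if l.isEmpty then
      (if 2 ≤ 1 + (rest.takeWhile (fun x => x.isEmpty)).length then [pvBr] else [])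
        ++ pvAltGo fuel (rest.dropWhile (fun x => x.isEmpty))
    else
      pvPara (l :: rest.takeWhile (fun x => !x.isEmpty))
        :: pvAltGo fuel (rest.dropWhile (fun x => !x.isEmpty))

def format_whitespace_py_alt (block : String) : String :=
  let lines := (PySem.Chars.splitlines (PySem.Chars.strip block.toList)).map PySem.Chars.strip
  String.ofList (PySem.Chars.join [] (pvAltGo lines.length lines))

-- ===== PRECONDITION & SPEC =====
def Spec_format_whitespace_py (block : String) (out : String) : Prop := out = format_whitespace_py_alt block
instance (block : String) (out : String) : Decidable (Spec_format_whitespace_py block out) := by unfold Spec_format_whitespace_py; infer_instance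

-- ===== CLAIM (what is proved, stated in full; the proofs are below) =====
def Claim_equal_format_whitespace_py : Prop := ∀ (block : String), Dom_format_whitespace_py block → Spec_format_whitespace_py block (format_whitespace_py block)

-- ===== LEMMAS AND PROOFS =====

-- A's step on an already-stripped line (pvAStep st ln0 = pvStep st (strip ln0), defeq)
def pvStep (st : List (List Char) × List (List Char) × Nat) (ln : List Char) :
    List (List Char) × List (List Char) × Nat :=
  let empty := if ln.isEmpty then st.2.2 + 1 else 0
  if ln.isEmpty && !st.2.1.isEmpty then (st.1 ++ [pvPara st.2.1], [], empty)
  else if !ln.isEmpty then (st.1, st.2.1 ++ [ln], empty)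
  else if empty ≤ 2 then (st.1 ++ [pvBr], st.2.1, empty)
  else (st.1, st.2.1, empty)

def pvFin (st : List (List Char) × List (List Char) × Nat) : List (List Char) :=
  if !st.2.1.isEmpty then st.1 ++ [pvPara st.2.1] else st.1

-- a run of non-blank lines is absorbed into current, empty resets to 0
theorem pv_runPara (run : List (List Char)) (hne : run ≠ []) (hnb : ∀ x ∈ run, x.isEmpty = false) :
    ∀ blocks cur e, List.foldl pvStep (blocks, cur, e) run = (blocks, cur ++ run, 0) := by
  induction run with
  | nil => exact absurd rfl hne
  | cons a r ih =>
    intro blocks cur e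
    have ha : a.isEmpty = false := hnb a (by simp)
    rw [List.foldl_cons]
    have hstep : pvStep (blocks, cur, e) a = (blocks, cur ++ [a], 0) := by
      simp [pvStep, ha]
    rw [hstep]
    rcases List.eq_nil_or_concat' r with rfl | ⟨L, b, rfl⟩
    · simp
    · rw [ih (by simp) (fun x hx => hnb x (by simp [hx]))]
      simp

-- a run of blank lines from current = [] and counter m ≥ 1: one "<br>" iff m = 1 and the run is nonempty
theorem pv_runGap (g : List (List Char)) (hb : ∀ x ∈ g, x.isEmpty = true) :
    ∀ blocks m, 1 ≤ m →
      List.foldl pvStep (blocks, [], m) g =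
        (blocks ++ (if m = 1 ∧ g ≠ [] then [pvBr] else []), ([] : List (List Char)), m + g.length) := by
  induction g with
  | nil => intro blocks m _; simp
  | cons a r ih =>
    intro blocks m hm
    have ha : a.isEmpty = true := hb a (by simp)
    rw [List.foldl_cons]
    have hstep : pvStep (blocks, [], m) a =
        (blocks ++ (if m + 1 ≤ 2 then [pvBr] else []), ([] : List (List Char)), m + 1) := by
      by_cases h2 : m + 1 ≤ 2 <;> simp [pvStep, ha, h2]
    rw [hstep, ih (fun x hx => hb x (by simp [hx])) _ (m + 1) (by omega)]
    rw [if_neg (by rintro ⟨h, -⟩; omega : ¬ (m + 1 = 1 ∧ r ≠ []))]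
    by_cases h1 : m = 1
    · subst h1
      rw [if_pos (by omega : (1 : Nat) + 1 ≤ 2), if_pos ⟨rfl, by simp⟩]
      simp
      omega
    · rw [if_neg (by omega : ¬ (m + 1 ≤ 2)), if_neg (by rintro ⟨h, -⟩; exact h1 h)]
      simp
      omega

-- pvAltGo ignores the fuel once it dominates the list length
theorem pvAltGo_irrel : ∀ (f1 f2 : Nat) (lines : List (List Char)), lines.length ≤ f1 →
    lines.length ≤ f2 → pvAltGo f1 lines = pvAltGo f2 lines := by
  intro f1
  induction f1 with
  | zero =>
    intro f2 lines h1 h2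
    have : lines = [] := List.length_eq_zero_iff.mp (Nat.le_zero.mp h1)
    subst this; cases f2 <;> simp [pvAltGo]
  | succ k ih =>
    intro f2 lines h1 h2
    cases lines with
    | nil => cases f2 <;> simp [pvAltGo]
    | cons l rest =>
      cases f2 with
      | zero => simp at h2
      | succ m =>
        simp only [pvAltGo]
        simp only [List.length_cons, Nat.add_le_add_iff_right] at h1 h2
        by_cases hl : l.isEmpty = true
        · rw [if_pos hl, if_pos hl,
            ih m _ (le_trans (List.length_dropWhile_le _ _) h1)
              (le_trans (List.length_dropWhile_le _ _) h2)]
        · rw [if_neg hl, if_neg hl,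
            ih m _ (le_trans (List.length_dropWhile_le _ _) h1)
              (le_trans (List.length_dropWhile_le _ _) h2)]

-- main invariant: from (blocks, [], e), a line list whose head is non-blank (or [])
-- finalizes to blocks ++ pvAltGo lines
theorem pv_main : ∀ (n : Nat) (lines : List (List Char)), lines.length ≤ n →
    (lines = [] ∨ ∃ l r, lines = l :: r ∧ l.isEmpty = false) →
    ∀ blocks e, pvFin (List.foldl pvStep (blocks, [], e) lines) = blocks ++ pvAltGo lines.length lines := by
  intro n
  induction n with
  | zero =>
    intro lines hlen hh blocks e
    have : lines = [] := List.length_eq_zero_iff.mp (Nat.le_zero.mp hlen)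
    subst this; simp [pvAltGo, pvFin]
  | succ n ih =>
    intro lines hlen hh blocks e
    rcases hh with rfl | ⟨l, rest, rfl, hl⟩
    · simp [pvAltGo, pvFin]
    · -- paragraph run: l :: takeWhile non-blank rest, then the remainder d
      set t := rest.takeWhile (fun x => !x.isEmpty) with ht
      set d := rest.dropWhile (fun x => !x.isEmpty) with hd
      have hrest : rest = t ++ d := (List.takeWhile_append_dropWhile (p := fun (x : List Char) => !x.isEmpty) (l := rest)).symm
      have hnbt : ∀ x ∈ l :: t, x.isEmpty = false := by
        intro x hx
        rcases List.mem_cons.mp hx with rfl | hx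
        · exact hl
        · rw [ht] at hx
          simpa using List.mem_takeWhile_imp hx
      have hfold1 : List.foldl pvStep (blocks, [], e) (l :: rest) =
          List.foldl pvStep (blocks, l :: t, 0) d := by
        conv_lhs => rw [show l :: rest = (l :: t) ++ d by rw [hrest]; simp]
        rw [List.foldl_append, pv_runPara (l :: t) (by simp) hnbt]
        simp
      have hdl : d.length ≤ rest.length := by rw [hd]; exact List.length_dropWhile_le _ _
      have haltgo : pvAltGo (l :: rest).length (l :: rest) = pvPara (l :: t) :: pvAltGo d.length d := by
        rw [show (l :: rest).length = rest.length + 1 by simp]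
        simp only [pvAltGo]
        rw [if_neg (by simp [hl])]
        rw [← ht, ← hd, pvAltGo_irrel rest.length d.length d hdl (le_refl _)]
      rcases hdm : d with _ | ⟨b0, d'⟩
      · rw [hfold1, hdm, haltgo, hdm]
        simp [pvFin, pvAltGo]
      · -- d = b0 :: d' with b0 blank
        have hdcons : d = b0 :: d' := hdm
        have hb0 : b0.isEmpty = true := by
          have := List.head?_dropWhile_not (fun x => !x.isEmpty) rest
          rw [← hd, hdcons] at this; simpa using this
        -- split d' into its blank run g and remainder d''
        set g := d'.takeWhile (fun x => x.isEmpty) with hg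
        set d'' := d'.dropWhile (fun x => x.isEmpty) with hd''
        have hd'eq : d' = g ++ d'' := (List.takeWhile_append_dropWhile (p := fun (x : List Char) => x.isEmpty) (l := d')).symm
        have hbg : ∀ x ∈ g, x.isEmpty = true := fun x hx => List.mem_takeWhile_imp hx
        have hflush : pvStep (blocks, l :: t, 0) b0 = (blocks ++ [pvPara (l :: t)], [], 1) := by
          simp [pvStep, hb0]
        have hfold2 : List.foldl pvStep (blocks, l :: t, 0) d =
            List.foldl pvStep (blocks ++ [pvPara (l :: t)] ++ (if g ≠ [] then [pvBr] else []), [], 1 + g.length) d'' := by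
          rw [hdcons, List.foldl_cons, hflush, hd'eq, List.foldl_append,
            pv_runGap g hbg _ 1 (le_refl 1)]
          simp
        have hh'' : d'' = [] ∨ ∃ l2 r2, d'' = l2 :: r2 ∧ l2.isEmpty = false := by
          cases hcase : d'' with
          | nil => exact Or.inl rfl
          | cons x xs =>
            refine Or.inr ⟨x, xs, rfl, ?_⟩
            have := List.head?_dropWhile_not (fun x => x.isEmpty) d'
            rw [← hd'', hcase] at this; simpa using this
        have hlen'' : d''.length ≤ n := by
          have h1 : d''.length ≤ d'.length := by rw [hd'eq]; simp
          have h2 : d'.length + 1 ≤ d.length := by rw [hdcons]; simp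
          have h3 : d.length ≤ rest.length := by rw [hrest]; simp
          simp at hlen; omega
        have hgapalt : pvAltGo d.length d = (if g ≠ [] then [pvBr] else []) ++ pvAltGo d''.length d'' := by
          rw [hdcons, show (b0 :: d').length = d'.length + 1 by simp]
          simp only [pvAltGo]
          rw [if_pos hb0, ← hg, ← hd'',
            pvAltGo_irrel d'.length d''.length d''
              (by rw [hd'']; exact List.length_dropWhile_le _ _) (le_refl _)]
          congr 1
          by_cases hgn : g = []
          · simp [hgn]
          · have hg1 : 0 < g.length := List.length_pos_of_ne_nil hgn
            rw [if_pos (by omega), if_pos hgn]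
        rw [hfold1, hfold2, ih d'' hlen'' hh'' _ (1 + g.length), haltgo, hgapalt]
        simp

-- the head of strip cs is never whitespace
theorem pv_strip_head (cs : List Char) (c : Char) (l : List Char)
    (h : PySem.Chars.strip cs = c :: l) : PySem.Chars.isspace c = false := by
  unfold PySem.Chars.strip PySem.Chars.rstrip PySem.Chars.lstrip at h
  have h2 : List.dropWhile PySem.Chars.isspace ((List.dropWhile PySem.Chars.isspace cs).reverse) = (c :: l).reverse := by
    rw [← h, List.reverse_reverse]
  have hsfx : (c :: l).reverse <:+ (List.dropWhile PySem.Chars.isspace cs).reverse := by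
    rw [← h2]; exact List.dropWhile_suffix _
  have hpre : c :: l <+: List.dropWhile PySem.Chars.isspace cs := by
    rw [← List.reverse_suffix]; exact hsfx
  obtain ⟨tt, htt⟩ := hpre
  have := List.head?_dropWhile_not PySem.Chars.isspace cs
  rw [← htt] at this; simpa using this

-- strip of a list with non-space head is nonempty
theorem pv_strip_cons_ne_nil (c : Char) (l : List Char) (h : PySem.Chars.isspace c = false) :
    PySem.Chars.strip (c :: l) ≠ [] := by
  unfold PySem.Chars.strip PySem.Chars.rstrip PySem.Chars.lstrip
  rw [List.dropWhile_cons_of_neg (by simp [h])]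
  intro hn
  have hnil : List.dropWhile PySem.Chars.isspace (c :: l).reverse = [] := by
    simpa using hn
  rw [List.dropWhile_eq_nil_iff] at hnil
  exact (by simp [h] : ¬ (PySem.Chars.isspace c = true)) (hnil c (by simp))

theorem pv_go_cons (isB : Char → Bool) (c : Char) (s : List Char) (cur acc)
    (h : isB c = false) (hr : c ≠ '\x0d') :
    PySem.Chars.splitlines.go isB (c :: s) cur acc = PySem.Chars.splitlines.go isB s (c :: cur) acc := by
  match s with
  | [] => simp [PySem.Chars.splitlines.go, h]
  | x :: rest =>
    rw [PySem.Chars.splitlines.go]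
    · simp [h]
    · intro r hc _; exact hr hc

theorem pv_go_struct (isB : Char → Bool) (s cur : List Char) (acc : List (List Char)) :
    ∃ t, PySem.Chars.splitlines.go isB s cur acc = acc.reverse ++ t ∧
      ((t = [] ∧ cur = []) ∨ ∃ l r, t = (cur.reverse ++ l) :: r) := by
  induction s, cur, acc using PySem.Chars.splitlines.go.induct isB with
  | case1 cur acc hc =>
    refine ⟨[], ?_, Or.inl ⟨rfl, by simpa using hc⟩⟩
    simp [PySem.Chars.splitlines.go, hc]
  | case2 cur acc hc =>
    refine ⟨[cur.reverse], ?_, Or.inr ⟨[], [], by simp⟩⟩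
    simp [PySem.Chars.splitlines.go, hc]
  | case3 rest cur acc ih =>
    obtain ⟨t', h1, h2⟩ := ih
    refine ⟨cur.reverse :: t', ?_, Or.inr ⟨[], t', by simp⟩⟩
    rw [PySem.Chars.splitlines.go, h1]; simp
  | case4 c rest cur acc hne hB ih =>
    obtain ⟨t', h1, h2⟩ := ih
    refine ⟨cur.reverse :: t', ?_, Or.inr ⟨[], t', by simp⟩⟩
    rw [PySem.Chars.splitlines.go]
    · simp [hB, h1]
    · intro r hc hr; exact hne r hc hr
  | case5 c rest cur acc hne hB ih =>
    obtain ⟨t', h1, h2⟩ := ih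
    rcases h2 with ⟨rfl, hcc⟩ | ⟨l, r, rfl⟩
    · exact absurd hcc (by simp)
    · refine ⟨(cur.reverse ++ (c :: l)) :: r, ?_, Or.inr ⟨c :: l, r, rfl⟩⟩
      rw [PySem.Chars.splitlines.go]
      · simp [hB, h1]
      · intro r hc hr; exact hne r hc hr

-- the first line of splitlines starts with the first character, when it is non-space
theorem pv_splitlines_cons (c : Char) (s : List Char) (h : PySem.Chars.isspace c = false) :
    ∃ l r, PySem.Chars.splitlines (c :: s) = (c :: l) :: r := by
  have hsp : ¬ (c.toNat = 10 ∨ c.toNat = 13 ∨ c.toNat = 11 ∨ c.toNat = 12 ∨ c.toNat = 28 ∨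
      c.toNat = 29 ∨ c.toNat = 30 ∨ c.toNat = 133 ∨ c.toNat = 8232 ∨ c.toNat = 8233) := by
    simp only [PySem.Chars.isspace] at h
    simp only [Bool.or_eq_false_iff, Bool.and_eq_false_iff, decide_eq_false_iff_not] at h
    omega
  unfold PySem.Chars.splitlines
  rw [pv_go_cons]
  · obtain ⟨t, h1, h2⟩ := pv_go_struct _ s [c] []
    rcases h2 with ⟨_, hc⟩ | ⟨l, r, rfl⟩
    · simp at hc
    · exact ⟨l, r, by simpa using h1⟩
  · simp only [Bool.or_eq_false_iff, decide_eq_false_iff_not]; omega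
  · intro hc; apply hsp; subst hc; simp

-- ===== VERDICT (by name: the statement is the Claim_ definition above) =====
theorem format_whitespace_py_spec : Claim_equal_format_whitespace_py := by
  intro block _
  simp only [Spec_format_whitespace_py, format_whitespace_py, format_whitespace_py_alt]
  cases hs : PySem.Chars.strip block.toList with
  | nil =>
    simp [show PySem.Chars.splitlines ([] : List Char) = [] from rfl, pvAltGo]
  | cons c s =>
    have hcns : PySem.Chars.isspace c = false := pv_strip_head _ _ _ hs
    obtain ⟨l, r, hsl⟩ := pv_splitlines_cons c s hcns
    rw [hsl]
    have hfoldmap : ((c :: l) :: r).foldl pvAStep ([], [], 0)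
        = (((c :: l) :: r).map PySem.Chars.strip).foldl pvStep ([], [], 0) := by
      rw [List.foldl_map]; rfl
    rw [hfoldmap]
    have hhead : (PySem.Chars.strip (c :: l)).isEmpty = false := by
      cases hh : PySem.Chars.strip (c :: l) with
      | nil => exact absurd hh (pv_strip_cons_ne_nil c l hcns)
      | cons _ _ => simp
    have hmain := pv_main (((c :: l) :: r).map PySem.Chars.strip).length
      (((c :: l) :: r).map PySem.Chars.strip) (le_refl _)
      (Or.inr ⟨PySem.Chars.strip (c :: l), r.map PySem.Chars.strip, by simp, hhead⟩) [] 0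
    rw [pvFin] at hmain
    rw [hmain]
    simp
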